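-- pv_equiv track=rewrite | github.com/gmahone/daily_python | consonant_value.py | solve
-- ===== SOURCE A (Python) =====
-- def solve(s):
--     score_dict = {
--         "a" : 1,
--         "b" : 2,
--         "c" : 3,
--         "d" : 4,
--         "e" : 5,
--         "f" : 6,
--         "g" : 7,
--         "h" : 8,
--         "i" : 9,
--         "j" : 10,
--         "k" : 11,
--         "l" : 12,
--         "m" : 13,
--         "n" : 14,
--         "o" : 15,
--         "p" : 16,
--         "q" : 17,
--         "r" : 18,
--         "s" : 19,
--         "t" : 20,
--         "u" : 21,
--         "v" : 22,
--         "w" : 23,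
--         "x" : 24,
--         "y" : 25,
--         "z" : 26
--     }
--
--     for vowel in "aeiou":
--         s = s.replace(vowel, "_")
--
--     s_list = s.split("_")
--
--     result_list = []
--     for consonant_group in s_list:
--         score = [score_dict.get(consonant) for consonant in consonant_group]
--         result_list.append(sum(score))
--     return max(result_list)
-- ===== SOURCE B (Python) =====
-- def solve(s):
--     score_dict = {
--         "a": 1, "b": 2, "c": 3, "d": 4, "e": 5, "f": 6, "g": 7, "h": 8,
--         "i": 9, "j": 10, "k": 11, "l": 12, "m": 13, "n": 14, "o": 15,
--         "p": 16, "q": 17, "r": 18, "s": 19, "t": 20, "u": 21, "v": 22,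
--         "w": 23, "x": 24, "y": 25, "z": 26
--     }
--     best = 0
--     cur = 0
--     for c in s:
--         if c in "aeiou_":
--             best = max(best, cur)
--             cur = 0
--         else:
--             cur += score_dict.get(c)
--     return max(best, cur)
-- ===== Notes on version B (the rewrite author's own statement) =====
-- stated objective: alternative
-- what changed: replaces A's replace-vowels/split-on-underscore/map-sum/max pipeline (which builds intermediate strings and lists) by a single left-to-right pass maintaining the current group score and the best score seen
import Mathlib
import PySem

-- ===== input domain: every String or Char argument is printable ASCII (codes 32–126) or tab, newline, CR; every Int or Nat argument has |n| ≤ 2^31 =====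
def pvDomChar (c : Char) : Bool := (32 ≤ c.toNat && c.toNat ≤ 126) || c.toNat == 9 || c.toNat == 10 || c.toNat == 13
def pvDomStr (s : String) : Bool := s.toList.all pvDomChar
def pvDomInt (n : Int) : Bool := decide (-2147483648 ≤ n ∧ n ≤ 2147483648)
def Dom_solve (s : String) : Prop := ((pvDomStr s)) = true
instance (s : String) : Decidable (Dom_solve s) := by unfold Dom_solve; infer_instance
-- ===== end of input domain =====

-- B replaces A's replace-vowels/split/map-sum/max pipeline by a single left-to-right pass
-- keeping the current group score and the best so far (alternative decomposition, same cost).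

-- ===== PORT A =====
def pvScoreDict : PySem.Dict Char Int := PySem.Dict.mk
  [('a',1),('b',2),('c',3),('d',4),('e',5),('f',6),('g',7),('h',8),('i',9),('j',10),
   ('k',11),('l',12),('m',13),('n',14),('o',15),('p',16),('q',17),('r',18),('s',19),
   ('t',20),('u',21),('v',22),('w',23),('x',24),('y',25),('z',26)]

-- Python sum over a list that may contain None: none = TypeError (excluded by Pre_solve)
def pvSum (xs : List (Option Int)) : Option Int :=
  xs.foldl (fun a o => match a, o with | some x, some v => some (x + v) | _, _ => none) (some 0)

-- Python max over the per-group sums: none = unreachable here (split never yields [])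
def pvMax : List (Option Int) → Option Int
  | [] => none
  | r :: rs => rs.foldl (fun a o => match a, o with | some x, some v => some (max x v) | _, _ => none) r

def solve (s : String) : Int :=
  let s1 := "aeiou".toList.foldl (fun t v => PySem.Str.replace t (String.ofList [v]) "_") s
  let groups := (PySem.Str.split? s1 "_").getD []   -- sep "_" ≠ "": split? is always some here
  let results := groups.map (fun g => pvSum (g.toList.map (fun c => PySem.Dict.get? pvScoreDict c)))
  (pvMax results).getD 0   -- getD: where pvMax is none, Python raised (outside Pre_solve)

-- ===== PORT B =====
-- state = (best, cur); cur = none marks Python's TypeError state (cur += None), outside Pre_solve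
def pvStep (st : Int × Option Int) (c : Char) : Int × Option Int :=
  if PySem.Chars.isIn [c] "aeiou_".toList then (max st.1 (st.2.getD 0), some 0)
  else (st.1, st.2.bind (fun a => (PySem.Dict.get? pvScoreDict c).map (fun v => a + v)))

def solve_alt (s : String) : Int :=
  let st := s.toList.foldl pvStep (0, some 0)
  max st.1 (st.2.getD 0)

-- ===== PRECONDITION & SPEC =====
-- Pre_solve: exactly the inputs where A returns: any other character is looked up as None
-- and makes Python's sum raise TypeError.
def Pre_solve (s : String) : Prop :=
  (s.toList.all (fun c => "abcdefghijklmnopqrstuvwxyz_".toList.contains c)) = true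
instance (s : String) : Decidable (Pre_solve s) := by unfold Pre_solve; infer_instance
def pvWitness_solve : String := "zodiac_hut"

def Spec_solve (s : String) (out : Int) : Prop := out = solve_alt s
instance (s : String) (out : Int) : Decidable (Spec_solve s out) := by unfold Spec_solve; infer_instance

-- ===== CLAIM (what is proved, stated in full; the proofs are below) =====
def Claim_equal_solve : Prop := ∀ (s : String), Dom_solve s → Pre_solve s → Spec_solve s (solve s)

-- ===== LEMMAS AND PROOFS =====

def pvSep (c : Char) : Bool := "aeiou_".toList.contains c
def pvSubst (c : Char) : Char := if "aeiou".toList.contains c then '_' else c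
def pvVal (c : Char) : Int := (c.toNat : Int) - 96
def pvSumG (g : List Char) : Int := (g.map pvVal).sum

def pvGroups : List Char → List (List Char)
  | [] => [[]]
  | c :: t => if pvSep c then [] :: pvGroups t
              else match pvGroups t with
                   | [] => [[c]]
                   | g :: gs => (c :: g) :: gs

def pvM (b k : Int) : List (List Char) → Int
  | [] => b
  | g :: gs => max b ((gs.map pvSumG).foldl max (k + pvSumG g))

theorem pvGroups_cons_sep {c : Char} {t : List Char} (h : pvSep c = true) :
    pvGroups (c :: t) = [] :: pvGroups t := by
  simp [pvGroups, h]

theorem pvGroups_cons_nonsep {c : Char} {t : List Char} {g : List Char} {gs : List (List Char)}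
    (h : pvSep c = false) (hg : pvGroups t = g :: gs) :
    pvGroups (c :: t) = (c :: g) :: gs := by
  simp [pvGroups, h, hg]

theorem pvGroups_ne_nil (l : List Char) : pvGroups l ≠ [] := by
  cases l with
  | nil => simp [pvGroups]
  | cons c t =>
      simp only [pvGroups]
      split
      · simp
      · split <;> simp

theorem pv_isIn_singleton (c : Char) (l : List Char) :
    PySem.Chars.isIn [c] l = l.contains c := by
  by_cases h : c ∈ l
  · have h1 : [c] <:+: l := by
      obtain ⟨s, t, rfl⟩ := List.append_of_mem h
      exact ⟨s, t, by simp⟩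
    simp [(PySem.Chars.isIn_iff_infix _ _).mpr h1, h]
  · have h1 : ¬ [c] <:+: l := fun hin => h (hin.subset (by simp))
    simp [(PySem.Chars.isIn_eq_false_iff _ _).mpr h1, h]

theorem pv_replace_go (v : Char) :
    ∀ (l : List Char) (fuel : Nat) (acc : List Char), l.length ≤ fuel →
      PySem.Chars.replace.go [v] ['_'] fuel l acc =
        acc.reverse ++ l.map (fun c => if c == v then '_' else c) := by
  intro l
  induction l with
  | nil => intro fuel acc _; cases fuel <;> simp [PySem.Chars.replace.go]
  | cons c t ih =>
      intro fuel acc hf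
      cases fuel with
      | zero => simp at hf
      | succ f =>
          simp only [PySem.Chars.replace.go]
          by_cases hc : c = v
          · have hp : List.isPrefixOf [v] (c :: t) = true := by simp [hc, List.isPrefixOf]
            rw [if_pos hp]
            have := ih f ('_' :: acc) (by simpa using hf)
            simpa [hc] using this
          · have hp : List.isPrefixOf [v] (c :: t) = false := by
              simp [List.isPrefixOf, Ne.symm hc]
            rw [if_neg (by simp [hp])]
            have := ih f (c :: acc) (by simpa using hf)
            simpa [hc] using this

theorem pv_replace_single (l : List Char) (v : Char) :
    PySem.Chars.replace l [v] ['_'] = l.map (fun c => if c == v then '_' else c) := by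
  simp only [PySem.Chars.replace]
  rw [if_neg (by simp)]
  simpa using pv_replace_go v l l.length [] le_rfl

def pvSplitAux : List Char → List Char → List (List Char)
  | [], cur => [cur.reverse]
  | c :: t, cur => if c == '_' then cur.reverse :: pvSplitAux t [] else pvSplitAux t (c :: cur)

theorem pv_splitOn_go :
    ∀ (m : List Char) (fuel : Nat) (cur : List Char) (acc : List (List Char)), m.length ≤ fuel →
      PySem.Chars.splitOn.go ['_'] fuel m cur acc = acc.reverse ++ pvSplitAux m cur := by
  intro m
  induction m with
  | nil => intro fuel cur acc _; cases fuel <;> simp [PySem.Chars.splitOn.go, pvSplitAux]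
  | cons c t ih =>
      intro fuel cur acc hf
      cases fuel with
      | zero => simp at hf
      | succ f =>
          simp only [PySem.Chars.splitOn.go]
          by_cases hc : c = '_'
          · have hp : List.isPrefixOf ['_'] (c :: t) = true := by simp [hc, List.isPrefixOf]
            rw [if_pos hp]
            have := ih f [] (cur.reverse :: acc) (by simpa using hf)
            simpa [hc, pvSplitAux] using this
          · have hp : List.isPrefixOf ['_'] (c :: t) = false := by
              simp [List.isPrefixOf, Ne.symm hc]
            rw [if_neg (by simp [hp])]
            have := ih f (c :: cur) acc (by simpa using hf)
            simpa [hc, pvSplitAux] using this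

theorem pv_splitOn_eq (m : List Char) :
    PySem.Chars.splitOn m ['_'] = pvSplitAux m [] := by
  simpa using pv_splitOn_go m (m.length + 1) [] [] (by omega)

theorem pv_subst_sep {c : Char} (h : pvSep c = true) : pvSubst c = '_' := by
  simp only [pvSep, List.contains_eq_mem, decide_eq_true_eq,
    show "aeiou_".toList = ['a','e','i','o','u','_'] from by decide] at h
  simp only [pvSubst]
  fin_cases h <;> decide

theorem pv_subst_nonsep {c : Char} (h : pvSep c = false) : pvSubst c = c ∧ c ≠ '_' := by
  simp only [pvSep, List.contains_eq_mem] at h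
  simp only [pvSubst]
  constructor
  · rw [if_neg]
    intro hmem
    simp only [List.contains_eq_mem, decide_eq_true_eq,
      show "aeiou".toList = ['a','e','i','o','u'] from by decide] at hmem
    revert h
    fin_cases hmem <;> decide
  · rintro rfl
    revert h
    decide

theorem pv_splitAux_map :
    ∀ (l : List Char) (cur : List Char),
      pvSplitAux (l.map pvSubst) cur =
        match pvGroups l with
        | [] => []
        | g :: gs => (cur.reverse ++ g) :: gs := by
  intro l
  induction l with
  | nil => intro cur; simp [pvSplitAux, pvGroups]
  | cons c t ih =>
      intro cur
      cases hg : pvGroups t with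
      | nil => exact absurd hg (pvGroups_ne_nil t)
      | cons g gs =>
      by_cases hs : pvSep c = true
      · have h1 := pv_subst_sep hs
        rw [pvGroups_cons_sep hs, List.map_cons, h1]
        simp only [pvSplitAux]
        rw [if_pos (by decide), ih [], hg]
        simp
      · have hs' : pvSep c = false := by simpa using hs
        obtain ⟨h1, h2⟩ := pv_subst_nonsep hs'
        rw [pvGroups_cons_nonsep hs' hg, List.map_cons, h1]
        simp only [pvSplitAux]
        rw [if_neg (by simp [h2]), ih (c :: cur), hg]
        simp

theorem pv_groups_mem (l : List Char) :
    ∀ g ∈ pvGroups l, ∀ c ∈ g, c ∈ l ∧ pvSep c = false := by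
  induction l with
  | nil =>
      intro g hg c hc
      simp only [pvGroups, List.mem_singleton] at hg
      subst hg; simp at hc
  | cons d t ih =>
      intro g hg c hc
      cases hgt : pvGroups t with
      | nil => exact absurd hgt (pvGroups_ne_nil t)
      | cons g0 gs =>
      by_cases hs : pvSep d = true
      · rw [pvGroups_cons_sep hs] at hg
        rcases List.mem_cons.mp hg with h | h
        · subst h; simp at hc
        · obtain ⟨h1, h2⟩ := ih g h c hc
          exact ⟨List.mem_cons_of_mem _ h1, h2⟩
      · have hs' : pvSep d = false := by simpa using hs
        rw [pvGroups_cons_nonsep hs' hgt] at hg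
        rcases List.mem_cons.mp hg with h | h
        · subst h
          rcases List.mem_cons.mp hc with h0 | h0
          · subst h0; exact ⟨List.mem_cons_self, hs'⟩
          · obtain ⟨h1, h2⟩ := ih g0 (by rw [hgt]; exact List.mem_cons_self) c h0
            exact ⟨List.mem_cons_of_mem _ h1, h2⟩
        · obtain ⟨h1, h2⟩ := ih g (by rw [hgt]; exact List.mem_cons_of_mem _ h) c hc
          exact ⟨List.mem_cons_of_mem _ h1, h2⟩

-- lookup facts for valid characters
theorem pv_lookup {c : Char}
    (hv : c ∈ "abcdefghijklmnopqrstuvwxyz_".toList) (hs : pvSep c = false) :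
    PySem.Dict.get? pvScoreDict c = some (pvVal c) ∧ 0 ≤ pvVal c := by
  rw [show "abcdefghijklmnopqrstuvwxyz_".toList =
    ['a','b','c','d','e','f','g','h','i','j','k','l','m','n','o','p','q','r','s','t','u','v','w','x','y','z','_'] from by decide] at hv
  fin_cases hv <;> first
    | (exact absurd hs (by decide))
    | exact ⟨by decide, by decide⟩

theorem pv_sumG_nonneg {g : List Char} (h : ∀ c ∈ g, 0 ≤ pvVal c) : 0 ≤ pvSumG g := by
  unfold pvSumG
  apply List.sum_nonneg
  intro x hx
  obtain ⟨c, hc, rfl⟩ := List.mem_map.mp hx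
  exact h c hc

theorem pv_sum_aux :
    ∀ (g : List Char) (a : Int), (∀ c ∈ g, PySem.Dict.get? pvScoreDict c = some (pvVal c)) →
      (g.map (fun c => PySem.Dict.get? pvScoreDict c)).foldl
        (fun a o => match a, o with | some x, some v => some (x + v) | _, _ => none)
        (some a) = some (a + pvSumG g) := by
  intro g
  induction g with
  | nil => intro a _; simp [pvSumG]
  | cons c t ih =>
      intro a h
      simp only [List.map_cons, List.foldl_cons, h c List.mem_cons_self]
      rw [ih (a + pvVal c) (fun d hd => h d (List.mem_cons_of_mem _ hd))]
      simp [pvSumG, add_assoc]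

theorem pv_sum_some (g : List Char)
    (h : ∀ c ∈ g, PySem.Dict.get? pvScoreDict c = some (pvVal c)) :
    pvSum (g.map (fun c => PySem.Dict.get? pvScoreDict c)) = some (pvSumG g) := by
  unfold pvSum
  simpa using pv_sum_aux g 0 h

theorem pv_max_some :
    ∀ (xs : List Int) (a : Int),
      (xs.map some).foldl
        (fun acc o => match acc, o with | some x, some v => some (max x v) | _, _ => none)
        (some a) = some (xs.foldl max a) := by
  intro xs
  induction xs with
  | nil => intro a; simp
  | cons x t ih => intro a; simp only [List.map_cons, List.foldl_cons]; exact ih (max a x)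

theorem pv_foldl_max_max (xs : List Int) : ∀ a b, xs.foldl max (max a b) = max a (xs.foldl max b) := by
  induction xs with
  | nil => intro a b; simp
  | cons x t ih =>
      intro a b
      simp only [List.foldl_cons]
      rw [max_assoc, ih]

theorem pv_map5 (l : List Char) :
    ((((l.map (fun c => if c == 'a' then '_' else c)).map
        (fun c => if c == 'e' then '_' else c)).map
        (fun c => if c == 'i' then '_' else c)).map
        (fun c => if c == 'o' then '_' else c)).map
        (fun c => if c == 'u' then '_' else c) = l.map pvSubst := by
  induction l with
  | nil => simp
  | cons c t ih =>
      simp only [List.map_cons]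
      rw [List.cons.injEq]
      refine ⟨?_, ih⟩
      by_cases h : c ∈ ['a', 'e', 'i', 'o', 'u']
      · fin_cases h <;> decide
      · simp only [List.mem_cons, not_or] at h
        obtain ⟨ha, he, hi, ho, hu⟩ := h
        simp [pvSubst, show "aeiou".toList = ['a','e','i','o','u'] from by decide,
          ha, he, hi, ho, hu]

theorem pv_pre_mem {s : String} (hp : Pre_solve s) :
    ∀ c ∈ s.toList, c ∈ "abcdefghijklmnopqrstuvwxyz_".toList := by
  intro c hc
  have := List.all_eq_true.mp hp c hc
  simpa [List.contains_eq_mem] using this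

theorem pv_solveA_eq (s : String) (hp' : Pre_solve s) :
    solve s = pvM 0 0 (pvGroups s.toList) := by
  have hp := pv_pre_mem hp'
  unfold solve
  have htl : ("aeiou".toList.foldl
      (fun t v => PySem.Str.replace t (String.ofList [v]) "_") s).toList
      = s.toList.map pvSubst := by
    rw [show "aeiou".toList = ['a','e','i','o','u'] from by decide]
    simp only [List.foldl_cons, List.foldl_nil]
    simp only [PySem.Str.toList_replace, String.toList_ofList,
      show ("_" : String).toList = ['_'] from by decide]
    simp only [pv_replace_single]
    exact pv_map5 s.toList
  cases hgl : pvGroups s.toList with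
  | nil => exact absurd hgl (pvGroups_ne_nil _)
  | cons g gs =>
  show (pvMax (((PySem.Str.split? ("aeiou".toList.foldl (fun t v => PySem.Str.replace t (String.ofList [v]) "_") s) "_").getD []).map (fun g => pvSum (g.toList.map (fun c => PySem.Dict.get? pvScoreDict c))))).getD 0 = pvM 0 0 (g :: gs)
  have hsplit : PySem.Str.split? ("aeiou".toList.foldl
      (fun t v => PySem.Str.replace t (String.ofList [v]) "_") s) "_"
      = some ((g :: gs).map String.ofList) := by
    rw [PySem.Str.split?]
    rw [show ("_" : String).toList = ['_'] from by decide]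
    rw [PySem.Chars.split?, if_neg (by simp)]
    rw [htl, pv_splitOn_eq, pv_splitAux_map s.toList [], hgl]
    simp
  rw [hsplit]
  simp only [Option.getD_some, List.map_map]
  have hmem : ∀ c ∈ g :: gs, ∀ d ∈ c, PySem.Dict.get? pvScoreDict d = some (pvVal d) ∧ 0 ≤ pvVal d := by
    intro c hc d hd
    obtain ⟨h1, h2⟩ := pv_groups_mem s.toList c (by rw [hgl]; exact hc) d hd
    exact pv_lookup (hp d h1) h2
  have hres : ((g :: gs).map (fun x =>
      pvSum ((String.ofList x).toList.map (fun c => PySem.Dict.get? pvScoreDict c))))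
      = ((g :: gs).map pvSumG).map some := by
    simp only [List.map_map]
    apply List.map_congr_left
    intro x hx
    simp only [Function.comp, String.toList_ofList]
    exact pv_sum_some x (fun d hd => (hmem x hx d hd).1)
  simp only [Function.comp_def]
  rw [hres]
  simp only [List.map_cons]
  rw [show pvMax (some (pvSumG g) :: (gs.map pvSumG).map some)
      = some ((gs.map pvSumG).foldl max (pvSumG g)) from pv_max_some _ _]
  have h0 : 0 ≤ (gs.map pvSumG).foldl max (pvSumG g) := by
    refine le_trans ?_ (PySem.List.le_foldl_max (gs.map pvSumG) (pvSumG g)).1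
    exact pv_sumG_nonneg (fun d hd => (hmem g List.mem_cons_self d hd).2)
  simp only [pvM, Option.getD_some, zero_add]
  omega

theorem pv_solveB_eq :
    ∀ (l : List Char), (∀ c ∈ l, c ∈ "abcdefghijklmnopqrstuvwxyz_".toList) → ∀ (b k : Int),
      (let p := l.foldl pvStep (b, some k); max p.1 (p.2.getD 0)) = pvM b k (pvGroups l) := by
  intro l
  induction l with
  | nil => intro _ b k; simp [pvM, pvGroups, pvSumG]
  | cons c t ih =>
      intro hv b k
      cases hgt : pvGroups t with
      | nil => exact absurd hgt (pvGroups_ne_nil t)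
      | cons g gs =>
      have hvt : ∀ d ∈ t, d ∈ "abcdefghijklmnopqrstuvwxyz_".toList :=
        fun d hd => hv d (List.mem_cons_of_mem _ hd)
      by_cases hs : pvSep c = true
      · have hsep : PySem.Chars.isIn [c] "aeiou_".toList = pvSep c := pv_isIn_singleton c _
        have hstep : pvStep (b, some k) c = (max b k, some 0) := by
          unfold pvStep
          rw [hsep, hs]
          simp
        simp only [List.foldl_cons, hstep]
        rw [ih hvt (max b k) 0, pvGroups_cons_sep hs, hgt]
        simp only [pvM, List.map_cons, List.foldl_cons, pvSumG, List.map_nil,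
          List.sum_nil, add_zero, zero_add]
        rw [pv_foldl_max_max, max_assoc]
      · have hs' : pvSep c = false := by simpa using hs
        have hget := (pv_lookup (hv c List.mem_cons_self) hs').1
        have hsep : PySem.Chars.isIn [c] "aeiou_".toList = pvSep c := pv_isIn_singleton c _
        have hstep : pvStep (b, some k) c = (b, some (k + pvVal c)) := by
          unfold pvStep
          rw [hsep, hs']
          simp [hget]
        simp only [List.foldl_cons, hstep]
        rw [ih hvt b (k + pvVal c), hgt, pvGroups_cons_nonsep hs' hgt]
        simp only [pvM, pvSumG, List.map_cons, List.sum_cons]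
        rw [add_assoc]

-- ===== VERDICT (by name: the statement is the Claim_ definition above) =====
theorem solve_spec : Claim_equal_solve := by
  intro s _ hp
  show solve s = solve_alt s
  rw [pv_solveA_eq s hp]
  unfold solve_alt
  exact (pv_solveB_eq s.toList (pv_pre_mem hp) 0 0).symm
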